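-- pv_equiv track=rewrite | github.com/bodis/datahub-demo-ai | dhub/commands/datahub.py | sort_domains_by_hierarchy
-- ===== SOURCE A (Python) =====
-- from typing import Dict, List, Optional
--
-- def sort_domains_by_hierarchy(domains: List[Dict[str, str]]) -> List[Dict[str, str]]:
--     """Sort domains so parent domains are created before their children.
--
--     Uses topological sort to handle arbitrary nesting levels.
--     """
--     # Build adjacency list
--     children_map: Dict[Optional[str], List[Dict[str, str]]] = {}
--     for domain in domains:
--         parent = domain['parent_domain_id']
--         if parent not in children_map:
--             children_map[parent] = []
--         children_map[parent].append(domain)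
--
--     # Topological sort (DFS)
--     sorted_domains = []
--     visited = set()
--
--     def visit(domain_id: Optional[str]):
--         if domain_id in visited:
--             return
--         visited.add(domain_id)
--
--         # Visit children
--         if domain_id in children_map:
--             for child in children_map[domain_id]:
--                 visit(child['domain_id'])
--                 sorted_domains.append(child)
--
--     # Start with root domains (no parent)
--     visit(None)
--
--     return sorted_domains
-- ===== SOURCE B (Python) =====
-- def sort_domains_by_hierarchy(domains):
--     """Iterative post-order DFS with an explicit stack instead of recursion."""
--     children_map = {}
--     for domain in domains:
--         children_map.setdefault(domain['parent_domain_id'], []).append(domain)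
--
--     sorted_domains = []
--     visited = set()
--     # frames: (True, domain_id, None) = expand a node; (False, None, domain) = emit a domain
--     stack = [(True, None, None)]
--     while stack:
--         is_expand, node_id, dom = stack.pop()
--         if not is_expand:
--             sorted_domains.append(dom)
--             continue
--         if node_id in visited:
--             continue
--         visited.add(node_id)
--         for child in reversed(children_map.get(node_id, [])):
--             stack.append((False, None, child))
--             stack.append((True, child['domain_id'], None))
--     return sorted_domains
-- ===== Notes on version B (the rewrite author's own statement) =====
-- stated objective: alternative
-- what changed: A's recursive DFS visit() is replaced by an iterative post-order DFS over an explicit stack of expand/emit frames with the same visited-set guard, producing the identical emission order without recursion.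
import Mathlib
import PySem

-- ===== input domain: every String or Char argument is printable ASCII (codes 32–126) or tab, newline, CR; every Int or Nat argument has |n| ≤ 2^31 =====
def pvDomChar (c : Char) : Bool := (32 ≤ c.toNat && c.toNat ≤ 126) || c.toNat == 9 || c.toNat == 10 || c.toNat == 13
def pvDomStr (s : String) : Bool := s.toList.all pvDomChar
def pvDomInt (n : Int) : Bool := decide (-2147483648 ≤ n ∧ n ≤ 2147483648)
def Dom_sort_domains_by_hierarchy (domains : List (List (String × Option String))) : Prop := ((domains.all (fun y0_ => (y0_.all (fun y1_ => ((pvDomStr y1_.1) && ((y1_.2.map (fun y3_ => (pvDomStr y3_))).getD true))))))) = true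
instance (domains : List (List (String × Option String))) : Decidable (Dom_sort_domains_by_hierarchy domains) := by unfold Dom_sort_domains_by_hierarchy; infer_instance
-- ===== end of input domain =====

-- B replaces A's recursive DFS by an iterative explicit-stack post-order DFS (same cost); equivalence is about the return value only.

-- ===== PORT A =====
-- Python d[k] (dict lookup, first match). Under Pre_ the key is present; a missing key is a
-- KeyError in Python (excluded by Pre_) and is conflated with the value None by this total form.
def pvItem (d : List (String × Option String)) (k : String) : Option String :=
  ((PySem.Dict.mk d).get? k).getD none

-- the children_map-building loop (identical lines in A and in B, which uses setdefault for it)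
def pvChildrenMap (domains : List (List (String × Option String))) :
    PySem.Dict (Option String) (List (List (String × Option String))) :=
  domains.foldl
    (fun cm d =>
      let parent := pvItem d "parent_domain_id"
      let cm := if cm.contains parent then cm else cm.insert parent []
      cm.modify parent [] (fun l => l ++ [d]))
    PySem.Dict.empty

-- A's recursive visit(domain_id), acting on the state (visited, sorted_domains).
-- fuel is only a totality guard: every nested call adds a fresh id to visited and only
-- None or a stored domain_id can be added, so depth ≤ domains.length + 2 and the top-level
-- fuel domains.length + 2 is never exhausted.
def pvVisitA (cm : PySem.Dict (Option String) (List (List (String × Option String)))) :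
    Nat → Option String →
    PySem.Set (Option String) × List (List (String × Option String)) →
    PySem.Set (Option String) × List (List (String × Option String))
  | 0, _, st => st
  | fuel + 1, dId, st =>
    if PySem.Set.contains st.1 dId then st
    else
      let st1 := (PySem.Set.add st.1 dId, st.2)
      match cm.get? dId with
      | none => st1
      | some cs =>
          cs.foldl (fun s c =>
            let s' := pvVisitA cm fuel (pvItem c "domain_id") s
            (s'.1, s'.2 ++ [c])) st1

def sort_domains_by_hierarchy (domains : List (List (String × Option String))) :
    List (List (String × Option String)) :=
  (pvVisitA (pvChildrenMap domains) (domains.length + 2) none (PySem.Set.empty, [])).2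

-- ===== PORT B =====
-- a stack frame: Sum.inl (fuel, id) = "expand id" (fuel is the ghost totality guard),
-- Sum.inr d = "emit domain d"; the head of the list is the top of the stack.
-- pushing (emit c) then (expand c) for c in reversed(children) leaves, top-first:
-- expand c1, emit c1, expand c2, emit c2, …
def pvFrames (fuel : Nat) (cs : List (List (String × Option String))) :
    List ((Nat × Option String) ⊕ List (String × Option String)) :=
  cs.foldr (fun c acc => Sum.inl (fuel, pvItem c "domain_id") :: Sum.inr c :: acc) []

def pvFrameW (cm : PySem.Dict (Option String) (List (List (String × Option String))))
    (fr : (Nat × Option String) ⊕ List (String × Option String)) : Nat :=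
  match fr with
  | Sum.inl (f, _) => (2 * (cm.values.map List.length).sum + 2) ^ f
  | Sum.inr _ => 1

-- termination bookkeeping for pvRunB (cited by its decreasing_by)
theorem pvFrames_weight (cm : PySem.Dict (Option String) (List (List (String × Option String))))
    (f : Nat) (cs : List (List (String × Option String))) :
    ((pvFrames f cs).map (pvFrameW cm)).sum
      = cs.length * ((2 * (cm.values.map List.length).sum + 2) ^ f + 1) := by
  induction cs with
  | nil => simp [pvFrames]
  | cons c cs ih => simp [pvFrames, pvFrameW] at ih ⊢; rw [ih]; ring

theorem pvChildren_len_le (cm : PySem.Dict (Option String) (List (List (String × Option String))))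
    (dId : Option String) :
    ((cm.get? dId).getD []).length ≤ (cm.values.map List.length).sum := by
  cases h : cm.get? dId with
  | none => simp
  | some cs =>
    have hmem : cs ∈ cm.values := by
      have := PySem.Dict.mem_items_of_get?_eq_some (d := cm) h
      exact List.mem_map.mpr ⟨(dId, cs), this, rfl⟩
    simpa using List.single_le_sum (l := cm.values.map List.length) (by intros; positivity)
      cs.length (List.mem_map.mpr ⟨cs, hmem, rfl⟩)

-- B's while-loop over the explicit stack
def pvRunB (cm : PySem.Dict (Option String) (List (List (String × Option String)))) :
    List ((Nat × Option String) ⊕ List (String × Option String)) →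
    PySem.Set (Option String) × List (List (String × Option String)) →
    PySem.Set (Option String) × List (List (String × Option String))
  | [], st => st
  | Sum.inr d :: rest, st => pvRunB cm rest (st.1, st.2 ++ [d])
  | Sum.inl (0, _) :: rest, st => pvRunB cm rest st
  | Sum.inl (fuel + 1, dId) :: rest, st =>
    if PySem.Set.contains st.1 dId then pvRunB cm rest st
    else pvRunB cm (pvFrames fuel ((cm.get? dId).getD []) ++ rest)
           (PySem.Set.add st.1 dId, st.2)
  termination_by frames _ => (frames.map (pvFrameW cm)).sum
  decreasing_by
  · simp [pvFrameW]
  · simp [pvFrameW]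
  · simp [pvFrameW]
  · simp [pvFrameW, pvFrames_weight]
    have h1 := pvChildren_len_le cm dId
    have h2 : 1 ≤ (2 * (cm.values.map List.length).sum + 2) ^ fuel :=
      Nat.one_le_pow _ _ (by omega)
    calc ((cm.get? dId).getD []).length * ((2 * (cm.values.map List.length).sum + 2) ^ fuel + 1)
        ≤ (cm.values.map List.length).sum * ((2 * (cm.values.map List.length).sum + 2) ^ fuel + 1) :=
          Nat.mul_le_mul_right _ h1
      _ < (2 * (cm.values.map List.length).sum + 2) ^ (fuel + 1) := by
          rw [pow_succ]
          nlinarith [h2]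

def sort_domains_by_hierarchy_alt (domains : List (List (String × Option String))) :
    List (List (String × Option String)) :=
  (pvRunB (pvChildrenMap domains) [Sum.inl (domains.length + 2, none)] (PySem.Set.empty, [])).2

-- ===== PRECONDITION & SPEC =====
-- Pre_ excludes exactly the KeyError-prone inputs: a dict missing 'parent_domain_id' makes A
-- raise KeyError, and a dict missing 'domain_id' makes A raise KeyError when its parent gets
-- expanded, which can happen only if that parent is None or some listed domain_id; Pre_ still
-- excludes a few A-returning inputs where such a matching parent is nevertheless unreachable
-- from the root (see claim.json cites).
def Pre_sort_domains_by_hierarchy (domains : List (List (String × Option String))) : Prop :=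
  ∀ d ∈ domains, (PySem.Dict.mk d).contains "parent_domain_id" = true ∧
    ((pvItem d "parent_domain_id" = none ∨
        pvItem d "parent_domain_id" ∈ domains.map (fun e => pvItem e "domain_id")) →
      (PySem.Dict.mk d).contains "domain_id" = true)
instance (domains : List (List (String × Option String))) : Decidable (Pre_sort_domains_by_hierarchy domains) := by unfold Pre_sort_domains_by_hierarchy; infer_instance

def pvWitness_sort_domains_by_hierarchy : (List (List (String × Option String))) :=
  [[("domain_id", some "a"), ("parent_domain_id", none)],
   [("domain_id", some "b"), ("parent_domain_id", some "a")]]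

def Spec_sort_domains_by_hierarchy (domains : List (List (String × Option String))) (out : List (List (String × Option String))) : Prop := out = sort_domains_by_hierarchy_alt domains
instance (domains : List (List (String × Option String))) (out : List (List (String × Option String))) : Decidable (Spec_sort_domains_by_hierarchy domains out) := by unfold Spec_sort_domains_by_hierarchy; infer_instance

-- ===== CLAIM (what is proved, stated in full; the proofs are below) =====
def Claim_equal_sort_domains_by_hierarchy : Prop := ∀ (domains : List (List (String × Option String))), Dom_sort_domains_by_hierarchy domains → Pre_sort_domains_by_hierarchy domains → Spec_sort_domains_by_hierarchy domains (sort_domains_by_hierarchy domains)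

-- ===== LEMMAS AND PROOFS =====

-- expanding the frames of one child list = folding A's visit-and-append step over it
theorem pvRun_frames (cm : PySem.Dict (Option String) (List (List (String × Option String))))
    (f : Nat)
    (IH : ∀ dId st rest, pvRunB cm (Sum.inl (f, dId) :: rest) st
            = pvRunB cm rest (pvVisitA cm f dId st)) :
    ∀ (cs : List (List (String × Option String))) st rest,
      pvRunB cm (pvFrames f cs ++ rest) st
        = pvRunB cm rest
            (cs.foldl (fun s c =>
              let s' := pvVisitA cm f (pvItem c "domain_id") s
              (s'.1, s'.2 ++ [c])) st) := by
  intro cs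
  induction cs with
  | nil => intro st rest; simp [pvFrames]
  | cons c cs ih =>
    intro st rest
    have hfr : pvFrames f (c :: cs) ++ rest
        = Sum.inl (f, pvItem c "domain_id") :: Sum.inr c :: (pvFrames f cs ++ rest) := by
      simp [pvFrames]
    rw [hfr, IH, pvRunB, ih]
    simp

-- expanding one frame = one call of A's recursive visit
theorem pvRun_expand (cm : PySem.Dict (Option String) (List (List (String × Option String)))) :
    ∀ (fuel : Nat) (dId : Option String) st rest,
      pvRunB cm (Sum.inl (fuel, dId) :: rest) st = pvRunB cm rest (pvVisitA cm fuel dId st) := by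
  intro fuel
  induction fuel with
  | zero => intro dId st rest; rw [pvRunB, pvVisitA]
  | succ f ih =>
    intro dId st rest
    rw [pvRunB, pvVisitA]
    split_ifs with h
    · rfl
    · cases hc : cm.get? dId with
      | none => simp [pvFrames]
      | some cs =>
        simp only [Option.getD_some]
        exact pvRun_frames cm f ih cs _ rest

-- ===== VERDICT (by name: the statement is the Claim_ definition above) =====
theorem sort_domains_by_hierarchy_spec : Claim_equal_sort_domains_by_hierarchy := by
  intro domains _ _
  unfold Spec_sort_domains_by_hierarchy sort_domains_by_hierarchy sort_domains_by_hierarchy_alt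
  rw [pvRun_expand, pvRunB]
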